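-- pv_equiv track=rewrite | github.com/HelcioSoares-IFPI/SpuriousPatternTracker | src/utils/preProcessamento.py | remover_expressoes
-- ===== SOURCE A (Python) =====
-- def remover_expressoes(sentenca, lista_expressoes):
--     """
--     Remove specified expressions from the sentence.
--     """
--     # Split the sentence into words
--     palavras_sentenca = sentenca.split()
--
--     # Lists to store removed expressions and remaining words
--     expressoes_encontradas = []
--     palavras_restantes = palavras_sentenca.copy()
--
--     # Check each expression in the list
--     for expressao in lista_expressoes:
--         palavras_expressao = expressao.split()
--         # Check if all words of the expression are in the sentence
--         if all(palavra in palavras_sentenca for palavra in palavras_expressao):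
--             expressoes_encontradas.append(expressao)
--             # Remove the words of the found expression from the list of remaining words
--             for palavra in palavras_expressao:
--                 if palavra in palavras_restantes:
--                     palavras_restantes.remove(palavra)
--
--     # Reconstruct the sentence without the words of the removed expressions
--     sentenca_modificada = ' '.join(palavras_restantes)
--
--     return sentenca_modificada, expressoes_encontradas
-- ===== SOURCE B (Python) =====
-- def remover_expressoes(sentenca, lista_expressoes):
--     """
--     Remove specified expressions from the sentence.
--     Two-phase: first decide which expressions match (set membership) and
--     collect their words as a removal demand; then one left-to-right filter
--     pass over the sentence's words drops the demanded occurrences.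
--     """
--     palavras_sentenca = sentenca.split()
--     conjunto = set(palavras_sentenca)
--
--     expressoes_encontradas = []
--     a_remover = []  # multiset of words to drop (first occurrences)
--     for expressao in lista_expressoes:
--         palavras_expressao = expressao.split()
--         if all(p in conjunto for p in palavras_expressao):
--             expressoes_encontradas.append(expressao)
--             a_remover.extend(palavras_expressao)
--
--     restantes = []
--     for w in palavras_sentenca:
--         if w in a_remover:
--             a_remover.remove(w)
--         else:
--             restantes.append(w)
--
--     return ' '.join(restantes), expressoes_encontradas
-- ===== Notes on version B (the rewrite author's own statement) =====
-- stated objective: alternative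
-- what changed: Phase 1 tests expression words against a precomputed set of sentence words and only accumulates a removal demand; phase 2 is a single left-to-right filter pass over the sentence words, replacing A's per-expression list.remove edits of the remaining-words list.
import Mathlib
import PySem

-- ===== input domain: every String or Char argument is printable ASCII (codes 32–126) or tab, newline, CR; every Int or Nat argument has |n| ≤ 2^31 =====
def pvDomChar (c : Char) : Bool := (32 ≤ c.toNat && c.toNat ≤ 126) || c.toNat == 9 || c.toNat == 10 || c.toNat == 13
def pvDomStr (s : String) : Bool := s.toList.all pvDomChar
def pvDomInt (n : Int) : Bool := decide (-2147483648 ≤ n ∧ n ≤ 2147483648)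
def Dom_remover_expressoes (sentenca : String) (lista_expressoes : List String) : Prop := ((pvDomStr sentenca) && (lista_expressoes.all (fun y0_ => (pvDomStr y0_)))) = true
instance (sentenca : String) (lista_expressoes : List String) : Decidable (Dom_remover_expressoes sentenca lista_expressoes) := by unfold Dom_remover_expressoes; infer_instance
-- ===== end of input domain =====

-- B replaces A's per-expression `list.remove` edits of the remaining-words list by a
-- precomputed set for the membership test plus ONE left-to-right filter pass over the
-- sentence's words against an accumulated removal demand (alternative decomposition).

-- ===== PORT A =====
-- A's inner loop: `if palavra in palavras_restantes: palavras_restantes.remove(palavra)`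
-- (Python list.remove drops the FIRST equal element = List.erase).
def removeIfPresent (l : List String) (palavra : String) : List String :=
  if palavra ∈ l then l.erase palavra else l

-- the body of A's `for expressao in lista_expressoes` loop, state = (expressoes_encontradas, palavras_restantes)
def aStep (palavras_sentenca : List String) (st : List String × List String) (expressao : String) :
    List String × List String :=
  let palavras_expressao := PySem.Str.split₀ expressao
  if palavras_expressao.all (fun palavra => decide (palavra ∈ palavras_sentenca)) then
    (st.1 ++ [expressao], palavras_expressao.foldl removeIfPresent st.2)
  else st

def remover_expressoes (sentenca : String) (lista_expressoes : List String) : String × List String :=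
  let palavras_sentenca := PySem.Str.split₀ sentenca
  let res := lista_expressoes.foldl (aStep palavras_sentenca) ([], palavras_sentenca)
  (PySem.Str.join " " res.2, res.1)

-- ===== PORT B =====
-- the body of B's phase-1 loop, state = (expressoes_encontradas, a_remover)
def bStep (conjunto : PySem.Set String) (st : List String × List String) (expressao : String) :
    List String × List String :=
  let palavras_expressao := PySem.Str.split₀ expressao
  if palavras_expressao.all (fun p => decide (p ∈ conjunto)) then
    (st.1 ++ [expressao], st.2 ++ palavras_expressao)
  else st

-- B's phase-2 filter pass: `if w in a_remover: a_remover.remove(w) else: restantes.append(w)`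
def bPass : List String → List String → List String
  | [], _ => []
  | w :: ws, rem => if w ∈ rem then bPass ws (rem.erase w) else w :: bPass ws rem

def remover_expressoes_alt (sentenca : String) (lista_expressoes : List String) : String × List String :=
  let palavras := PySem.Str.split₀ sentenca
  let conjunto := PySem.Set.ofList palavras
  let st := lista_expressoes.foldl (bStep conjunto) ([], [])
  (PySem.Str.join " " (bPass palavras st.2), st.1)

-- ===== PRECONDITION & SPEC =====
def Spec_remover_expressoes (sentenca : String) (lista_expressoes : List String) (out : String × List String) : Prop := out = remover_expressoes_alt sentenca lista_expressoes
instance (sentenca : String) (lista_expressoes : List String) (out : String × List String) : Decidable (Spec_remover_expressoes sentenca lista_expressoes out) := by unfold Spec_remover_expressoes; infer_instance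

-- ===== CLAIM (what is proved, stated in full; the proofs are below) =====
def Claim_equal_remover_expressoes : Prop := ∀ (sentenca : String) (lista_expressoes : List String), Dom_remover_expressoes sentenca lista_expressoes → Spec_remover_expressoes sentenca lista_expressoes (remover_expressoes sentenca lista_expressoes)

-- ===== LEMMAS AND PROOFS =====

-- with an empty demand the filter pass keeps everything
theorem bPass_nil (orig : List String) : bPass orig [] = orig := by
  induction orig with
  | nil => rfl
  | cons w ws ih => simp [bPass, ih]

-- appending one more demanded word to the pass = removing its first occurrence afterwards
theorem bPass_append_singleton (orig : List String) :
    ∀ (rem : List String) (d : String),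
      bPass orig (rem ++ [d]) = removeIfPresent (bPass orig rem) d := by
  induction orig with
  | nil => intro rem d; simp [bPass, removeIfPresent]
  | cons w ws ih =>
    intro rem d
    by_cases hw : w ∈ rem
    · have hw' : w ∈ rem ++ [d] := List.mem_append_left _ hw
      simp only [bPass, if_pos hw, if_pos hw', List.erase_append_left _ hw]
      exact ih (rem.erase w) d
    · by_cases hwd : w = d
      · subst hwd
        have hw' : w ∈ rem ++ [w] := List.mem_append_right _ (List.mem_singleton_self w)
        have herase : (rem ++ [w]).erase w = rem := by
          rw [List.erase_append_right _ hw]; simp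
        simp only [bPass, if_pos hw', herase, if_neg hw, removeIfPresent]
        simp [List.erase_cons_head]
      · have hw' : w ∉ rem ++ [d] := by
          simp [List.mem_append, hw, hwd]
        simp only [bPass, if_neg hw, if_neg hw', ih rem d, removeIfPresent]
        by_cases hd : d ∈ bPass ws rem
        · have hd' : d ∈ w :: bPass ws rem := List.mem_cons_of_mem _ hd
          rw [if_pos hd, if_pos hd', List.erase_cons_tail (by simp [hwd])]
        · have hd' : d ∉ w :: bPass ws rem := by
            simp only [List.mem_cons, not_or]
            exact ⟨fun h => hwd h.symm, hd⟩
          rw [if_neg hd, if_neg hd']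

-- processing the demand list left-to-right with removeIfPresent IS the single filter pass
theorem foldl_removeIfPresent (ds orig : List String) :
    ds.foldl removeIfPresent orig = bPass orig ds := by
  induction ds using List.reverseRecOn with
  | nil => exact (bPass_nil orig).symm
  | append_singleton ds d ih =>
    rw [List.foldl_append, List.foldl_cons, List.foldl_nil, ih, bPass_append_singleton]

-- phase 1 of B is append-accumulating in its second component
theorem bStep_accum (c : PySem.Set String) (es : List String) :
    ∀ (f d : List String),
      es.foldl (bStep c) (f, d) =
        ((es.foldl (bStep c) (f, [])).1, d ++ (es.foldl (bStep c) (f, [])).2) := by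
  induction es with
  | nil => intro f d; simp
  | cons e es ih =>
    intro f d
    simp only [List.foldl_cons, bStep]
    by_cases h : (PySem.Str.split₀ e).all (fun p => decide (p ∈ c)) = true
    · simp only [if_pos h, List.nil_append]
      rw [ih (f ++ [e]) (d ++ PySem.Str.split₀ e), ih (f ++ [e]) (PySem.Str.split₀ e)]
      simp [List.append_assoc]
    · simp only [if_neg h]
      exact ih f d

-- the two membership tests agree
theorem cond_eq (palavras : List String) (pe : List String) :
    pe.all (fun p => decide (p ∈ PySem.Set.ofList palavras)) =
      pe.all (fun p => decide (p ∈ palavras)) := by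
  induction pe with
  | nil => rfl
  | cons p ps _ => simp only [List.all_cons, PySem.Set.mem_ofList]

-- A's loop over expressions = B's phase 1 followed by folding the demand into the rest
theorem fold_eq (palavras : List String) (es : List String) :
    ∀ (f r : List String),
      es.foldl (aStep palavras) (f, r) =
        ((es.foldl (bStep (PySem.Set.ofList palavras)) (f, [])).1,
         (es.foldl (bStep (PySem.Set.ofList palavras)) (f, [])).2.foldl removeIfPresent r) := by
  induction es with
  | nil => intro f r; simp
  | cons e es ih =>
    intro f r
    simp only [List.foldl_cons, aStep, bStep, cond_eq palavras (PySem.Str.split₀ e)]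
    by_cases h : (PySem.Str.split₀ e).all (fun p => decide (p ∈ palavras)) = true
    · simp only [if_pos h, List.nil_append]
      rw [ih (f ++ [e]) ((PySem.Str.split₀ e).foldl removeIfPresent r),
        bStep_accum (PySem.Set.ofList palavras) es (f ++ [e]) (PySem.Str.split₀ e)]
      simp [List.foldl_append]
    · simp only [if_neg h]
      exact ih f r

-- ===== VERDICT (by name: the statement is the Claim_ definition above) =====
theorem remover_expressoes_spec : Claim_equal_remover_expressoes := by
  intro sentenca lista_expressoes _
  unfold Spec_remover_expressoes
  simp only [remover_expressoes, remover_expressoes_alt]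
  rw [fold_eq (PySem.Str.split₀ sentenca) lista_expressoes [] (PySem.Str.split₀ sentenca),
    foldl_removeIfPresent]
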